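-- pv_equiv track=rewrite | github.com/lightdrk/leetcode | redo/2054.py | maxTwo
-- ===== SOURCE A (Python) =====
-- def binary(arr,right,val):
--     left = 0
--     while left <= right:
--         mid = left + (right-left)//2
--         if arr[mid][0] <= val:
--             left = mid+1
--         else:
--             right = mid-1
--
--     return right
--
-- def maxTwo(events):
--     events.sort()
--     l = len(events)
--     ans = 0
--     for i in range(l):
--         _, end, value = events[i]
--         high = 0
--         start = binary(events,l-1,end)
--         for s,e,v in events[start+1:]:
--             high = max(high,v)
--         ans = max(ans,high+value)
--     return ans
-- ===== SOURCE B (Python) =====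
-- def maxTwo(events):
--     events.sort()
--     n = len(events)
--     # suffix maxima of values: suf[i] = max value among events[i:], 0 if empty
--     suf = [0]
--     for ev in reversed(events):
--         suf.append(max(suf[-1], ev[2]))
--     suf.reverse()
--     ans = 0
--     for s, e, v in events:
--         # bisect_right over start times: first index whose start exceeds e
--         lo, hi = 0, n
--         while lo < hi:
--             mid = (lo + hi) // 2
--             if events[mid][0] <= e:
--                 lo = mid + 1
--             else:
--                 hi = mid
--         cand = suf[lo] + v
--         if cand > ans:
--             ans = cand
--     return ans
-- ===== Notes on version B (the rewrite author's own statement) =====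
-- stated objective: faster
-- what changed: B precomputes a suffix-max array over the sorted events and replaces A's per-event linear scan of events[start+1:] (plus A's inclusive-bounds binary search) with a half-open bisect and an O(1) suffix-max lookup.
import Mathlib
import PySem

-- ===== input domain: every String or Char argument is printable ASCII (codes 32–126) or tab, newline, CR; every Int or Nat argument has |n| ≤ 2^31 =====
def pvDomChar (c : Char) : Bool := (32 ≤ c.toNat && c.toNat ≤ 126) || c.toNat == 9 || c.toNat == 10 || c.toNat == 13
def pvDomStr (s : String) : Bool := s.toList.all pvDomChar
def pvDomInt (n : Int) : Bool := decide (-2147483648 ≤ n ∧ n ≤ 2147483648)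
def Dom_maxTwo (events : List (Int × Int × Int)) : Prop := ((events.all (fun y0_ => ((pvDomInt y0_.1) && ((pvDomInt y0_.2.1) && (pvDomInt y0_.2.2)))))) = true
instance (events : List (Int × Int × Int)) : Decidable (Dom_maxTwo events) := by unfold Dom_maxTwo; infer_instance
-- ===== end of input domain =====

-- B replaces A's per-event O(n) suffix scan by a precomputed suffix-max array (and a half-open
-- bisect instead of A's inclusive binary search): O(n log n) vs A's O(n^2).  Both Pythons sort
-- `events` in place (same observable mutation); the equivalence proved here is about the return value.

-- ===== PORT A =====
-- events.sort(): Python compares tuples lexicographically; modelled by a Lex-product sort key.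
def pvSortEv (events : List (Int × Int × Int)) : List (Int × Int × Int) :=
  PySem.List.sorted events (fun e => toLex (e.1, toLex (e.2.1, e.2.2)))

-- A's helper `binary(arr, right, val)` (the extra first argument `left = 0` is a local there);
-- arr[mid] would raise IndexError out of range; at A's call sites mid is always in range,
-- so the pyGetD default is never the computed value.
-- (the `fuel` argument only makes the while-loop total: the interval [lft, rgt] shrinks every
-- iteration, so any fuel ≥ its initial length runs the loop to its Python exit)
def binaryLoop (arr : List (Int × Int × Int)) (val : Int) : Nat → Int → Int → Int
  | 0, _, rgt => rgt
  | fuel + 1, lft, rgt =>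
    if lft ≤ rgt then
      let mid := lft + PySem.Int.floordiv (rgt - lft) 2
      if (PySem.List.pyGetD arr mid (0, 0, 0)).1 ≤ val then
        binaryLoop arr val fuel (mid + 1) rgt
      else
        binaryLoop arr val fuel lft (mid - 1)
    else rgt

def maxTwo (events : List (Int × Int × Int)) : Int :=
  let es := pvSortEv events
  let l : Int := (es.length : Int)
  (PySem.List.pyRange 0 l 1).foldl (fun ans i =>
    let ev := PySem.List.pyGetD es i (0, 0, 0)   -- events[i], i ∈ range(l): always in range
    let strt := binaryLoop es ev.2.1 (es.length + 1) 0 (l - 1)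
    let high := (PySem.List.slice es (some (strt + 1)) none).foldl (fun h t => max h t.2.2) 0
    max ans (high + ev.2.2)) 0

-- ===== PORT B =====
-- B's hand-written bisect_right over start times (half-open [lo, hi)); events[mid] always in range here.
-- (fuel as above: any fuel ≥ hi - lo reaches the loop's Python exit)
def bisLoop (arr : List (Int × Int × Int)) (val : Int) : Nat → Int → Int → Int
  | 0, lo, _ => lo
  | fuel + 1, lo, hi =>
    if lo < hi then
      let mid := PySem.Int.floordiv (lo + hi) 2
      if (PySem.List.pyGetD arr mid (0, 0, 0)).1 ≤ val then
        bisLoop arr val fuel (mid + 1) hi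
      else
        bisLoop arr val fuel lo mid
    else lo

-- suf = [0]; for ev in reversed(events): suf.append(max(suf[-1], ev[2])); suf.reverse()
def sufArr (es : List (Int × Int × Int)) : List Int :=
  (es.reverse.foldl (fun suf ev => suf ++ [max (PySem.List.pyGetD suf (-1) 0) ev.2.2]) [0]).reverse

def maxTwo_alt (events : List (Int × Int × Int)) : Int :=
  let es := pvSortEv events
  let n : Int := (es.length : Int)
  let suf := sufArr es
  es.foldl (fun ans ev =>
    let lo := bisLoop es ev.2.1 (es.length + 1) 0 n
    let cand := PySem.List.pyGetD suf lo 0 + ev.2.2   -- suf[lo], 0 ≤ lo ≤ n: always in range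
    if cand > ans then cand else ans) 0

-- ===== PRECONDITION & SPEC =====
def Spec_maxTwo (events : List (Int × Int × Int)) (out : Int) : Prop := out = maxTwo_alt events
instance (events : List (Int × Int × Int)) (out : Int) : Decidable (Spec_maxTwo events out) := by unfold Spec_maxTwo; infer_instance

-- ===== CLAIM (what is proved, stated in full; the proofs are below) =====
def Claim_equal_maxTwo : Prop := ∀ (events : List (Int × Int × Int)), Dom_maxTwo events → Spec_maxTwo events (maxTwo events)

-- ===== LEMMAS AND PROOFS =====

-- the number of events whose start does not exceed `val`
def pvCnt (es : List (Int × Int × Int)) (val : Int) : Nat :=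
  es.countP (fun e => decide (e.1 ≤ val))

lemma pv_fst_mono (es : List (Int × Int × Int))
    (hp : es.Pairwise (fun a b => a.1 ≤ b.1)) {i j : Nat} (hij : i ≤ j) (hj : j < es.length) :
    (es[i]'(by omega)).1 ≤ (es[j]'hj).1 := by
  rcases Nat.lt_or_ge i j with h | h
  · exact (List.pairwise_iff_getElem.mp hp) i j (by omega) hj h
  · have : i = j := by omega
    subst this; exact le_refl _

lemma pv_countP_eq (es : List (Int × Int × Int)) (val : Int) (c : Nat) (hc : c ≤ es.length)
    (h1 : ∀ j (hj : j < es.length), j < c → (es[j]'hj).1 ≤ val)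
    (h2 : ∀ j (hj : j < es.length), c ≤ j → val < (es[j]'hj).1) :
    pvCnt es val = c := by
  unfold pvCnt
  conv_lhs => rw [← List.take_append_drop c es]
  rw [List.countP_append]
  have ht : (es.take c).countP (fun e => decide (e.1 ≤ val)) = (es.take c).length := by
    rw [List.countP_eq_length]
    intro a ha
    obtain ⟨i, hi, rfl⟩ := List.mem_iff_getElem.mp ha
    have hi' : i < c := by
      have := hi
      simp [List.length_take] at this
      omega
    rw [List.getElem_take]
    exact decide_eq_true (h1 i (by omega) hi')
  have hd : (es.drop c).countP (fun e => decide (e.1 ≤ val)) = 0 := by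
    rw [List.countP_eq_zero]
    intro a ha
    obtain ⟨i, hi, rfl⟩ := List.mem_iff_getElem.mp ha
    rw [List.getElem_drop]
    simp only [decide_eq_true_eq]
    exact not_le.mpr (h2 (c + i) (by simp at hi; omega) (by omega))
  rw [ht, hd, List.length_take]
  omega

lemma binaryLoop_term (arr : List (Int × Int × Int)) (val : Int) (fuel : Nat) (lft rgt : Int)
    (h : ¬ lft ≤ rgt) : binaryLoop arr val fuel lft rgt = rgt := by
  cases fuel with
  | zero => rfl
  | succ f => simp [binaryLoop, h]

lemma bisLoop_term (arr : List (Int × Int × Int)) (val : Int) (fuel : Nat) (lo hi : Int)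
    (h : ¬ lo < hi) : bisLoop arr val fuel lo hi = lo := by
  cases fuel with
  | zero => rfl
  | succ f => simp [bisLoop, h]

lemma binaryLoop_eq (es : List (Int × Int × Int)) (val : Int)
    (hp : es.Pairwise (fun a b => a.1 ≤ b.1)) :
    ∀ (m : Nat) (lft rgt : Int), (rgt + 1 - lft).toNat ≤ m →
      0 ≤ lft → rgt < (es.length : Int) → lft ≤ rgt + 1 →
      (∀ (j : Nat) (hj : j < es.length), (j : Int) < lft → (es[j]'hj).1 ≤ val) →
      (∀ (j : Nat) (hj : j < es.length), rgt < (j : Int) → val < (es[j]'hj).1) →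
      binaryLoop es val m lft rgt = (pvCnt es val : Int) - 1 := by
  intro m
  induction m with
  | zero =>
    intro lft rgt hm h0 h1 h2 hlo hhi
    have hv : binaryLoop es val 0 lft rgt = rgt := rfl
    rw [hv]
    have hc : pvCnt es val = (rgt + 1).toNat := by
      apply pv_countP_eq es val _ (by omega)
      · intro j hj hjc; exact hlo j hj (by omega)
      · intro j hj hjc; exact hhi j hj (by omega)
    omega
  | succ m ih =>
    intro lft rgt hm h0 h1 h2 hlo hhi
    by_cases hle : lft ≤ rgt
    · simp only [binaryLoop]
      rw [if_pos hle]
      set mid := lft + PySem.Int.floordiv (rgt - lft) 2 with hmid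
      have hd : mid = lft + (rgt - lft) / 2 := by
        rw [hmid]; simp [PySem.Int.floordiv, Int.fdiv_eq_ediv]
      have hmr : lft ≤ mid ∧ mid ≤ rgt := by rw [hd]; omega
      have hmlt : mid.toNat < es.length := by omega
      have hg : PySem.List.pyGetD es mid (0, 0, 0) = es[mid.toNat]'hmlt := by
        exact PySem.List.pyGetD_eq_getElem es (0, 0, 0) (by omega) (by omega)
      rw [hg]
      by_cases hcmp : (es[mid.toNat]'hmlt).1 ≤ val
      · rw [if_pos hcmp]
        apply ih (mid + 1) rgt (by omega) (by omega) h1 (by omega) _ hhi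
        intro j hj hjlt
        by_cases hjl : (j : Int) < lft
        · exact hlo j hj hjl
        · exact le_trans (pv_fst_mono es hp (i := j) (j := mid.toNat) (by omega) hmlt) hcmp
      · rw [if_neg hcmp]
        apply ih lft (mid - 1) (by omega) h0 (by omega) (by omega) hlo
        intro j hj hjgt
        exact lt_of_lt_of_le (not_le.mp hcmp)
          (pv_fst_mono es hp (i := mid.toNat) (j := j) (by omega) hj)
    · rw [binaryLoop_term es val (m + 1) lft rgt hle]
      have hc : pvCnt es val = (rgt + 1).toNat := by
        apply pv_countP_eq es val _ (by omega)
        · intro j hj hjc; exact hlo j hj (by omega)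
        · intro j hj hjc; exact hhi j hj (by omega)
      omega

lemma bisLoop_eq (es : List (Int × Int × Int)) (val : Int)
    (hp : es.Pairwise (fun a b => a.1 ≤ b.1)) :
    ∀ (m : Nat) (lo hi : Int), (hi - lo).toNat ≤ m →
      0 ≤ lo → hi ≤ (es.length : Int) → lo ≤ hi →
      (∀ (j : Nat) (hj : j < es.length), (j : Int) < lo → (es[j]'hj).1 ≤ val) →
      (∀ (j : Nat) (hj : j < es.length), hi ≤ (j : Int) → val < (es[j]'hj).1) →
      bisLoop es val m lo hi = (pvCnt es val : Int) := by
  intro m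
  induction m with
  | zero =>
    intro lo hi hm h0 h1 h2 hlo hhi
    have hv : bisLoop es val 0 lo hi = lo := rfl
    rw [hv]
    have hc : pvCnt es val = lo.toNat := by
      apply pv_countP_eq es val _ (by omega)
      · intro j hj hjc; exact hlo j hj (by omega)
      · intro j hj hjc; exact hhi j hj (by omega)
    omega
  | succ m ih =>
    intro lo hi hm h0 h1 h2 hlo hhi
    by_cases hlt : lo < hi
    · simp only [bisLoop]
      rw [if_pos hlt]
      set mid := PySem.Int.floordiv (lo + hi) 2 with hmid
      have hd : mid = (lo + hi) / 2 := by
        rw [hmid]; simp [PySem.Int.floordiv, Int.fdiv_eq_ediv]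
      have hmr : lo ≤ mid ∧ mid < hi := by rw [hd]; omega
      have hmlt : mid.toNat < es.length := by omega
      have hg : PySem.List.pyGetD es mid (0, 0, 0) = es[mid.toNat]'hmlt := by
        exact PySem.List.pyGetD_eq_getElem es (0, 0, 0) (by omega) (by omega)
      rw [hg]
      by_cases hcmp : (es[mid.toNat]'hmlt).1 ≤ val
      · rw [if_pos hcmp]
        apply ih (mid + 1) hi (by omega) (by omega) h1 (by omega) _ hhi
        intro j hj hjlt
        by_cases hjl : (j : Int) < lo
        · exact hlo j hj hjl
        · exact le_trans (pv_fst_mono es hp (i := j) (j := mid.toNat) (by omega) hmlt) hcmp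
      · rw [if_neg hcmp]
        apply ih lo mid (by omega) h0 (by omega) (by omega) hlo
        intro j hj hjgt
        exact lt_of_lt_of_le (not_le.mp hcmp)
          (pv_fst_mono es hp (i := mid.toNat) (j := j) (by omega) hj)
    · rw [bisLoop_term es val (m + 1) lo hi hlt]
      have hc : pvCnt es val = lo.toNat := by
        apply pv_countP_eq es val _ (by omega)
        · intro j hj hjc; exact hlo j hj (by omega)
        · intro j hj hjc; exact hhi j hj (by omega)
      omega

lemma pv_foldl_app_ne_nil (g : List Int → (Int × Int × Int) → Int) :
    ∀ (xs : List (Int × Int × Int)) (acc : List Int), acc ≠ [] →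
      xs.foldl (fun s x => s ++ [g s x]) acc ≠ [] := by
  intro xs
  induction xs with
  | nil => intro acc h; exact h
  | cons x t iht => intro acc h; exact iht _ (by simp)

lemma pv_headD_eq_head (l : List Int) (h : l ≠ []) : l.headD 0 = l.head h := by
  cases l with
  | nil => exact absurd rfl h
  | cons a t => rfl

lemma sufArr_cons (e : Int × Int × Int) (t : List (Int × Int × Int)) :
    sufArr (e :: t) = max ((sufArr t).headD 0) e.2.2 :: sufArr t := by
  unfold sufArr
  rw [List.reverse_cons, List.foldl_append]
  set L := t.reverse.foldl (fun suf ev => suf ++ [max (PySem.List.pyGetD suf (-1) 0) ev.2.2]) [0] with hL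
  have hLne : L ≠ [] := pv_foldl_app_ne_nil _ t.reverse [0] (by simp)
  simp only [List.foldl_cons, List.foldl_nil]
  rw [List.reverse_append]
  simp only [List.reverse_cons, List.reverse_nil, List.nil_append, List.singleton_append]
  rw [PySem.List.pyGetD_neg_one L 0 hLne, List.getLast_eq_head_reverse,
    pv_headD_eq_head L.reverse (by simpa using hLne)]

lemma sufArr_length (es : List (Int × Int × Int)) : (sufArr es).length = es.length + 1 := by
  induction es with
  | nil => rfl
  | cons e t ih => rw [sufArr_cons]; simp [ih]

lemma pv_foldl_max_shift (t : List (Int × Int × Int)) :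
    ∀ a b : Int, t.foldl (fun h x => max h x.2.2) (max a b) = max a (t.foldl (fun h x => max h x.2.2) b) := by
  induction t with
  | nil => intro a b; rfl
  | cons x t ih =>
    intro a b
    simp only [List.foldl_cons]
    rw [max_assoc, ih]

lemma sufArr_getD (es : List (Int × Int × Int)) :
    ∀ k : Nat, k ≤ es.length →
      (sufArr es).getD k 0 = (es.drop k).foldl (fun h t => max h t.2.2) 0 := by
  induction es with
  | nil =>
    intro k hk
    simp at hk
    subst hk; rfl
  | cons e t ih =>
    intro k hk
    cases k with
    | zero =>
      rw [sufArr_cons]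
      have hh : (sufArr t).headD 0 = (sufArr t).getD 0 0 := by
        cases h : sufArr t with
        | nil =>
          have hlen := sufArr_length t
          rw [h] at hlen
          simp at hlen
        | cons a l' => simp
      simp only [List.getD_cons_zero, List.drop_zero, List.foldl_cons]
      rw [hh, ih 0 (by omega), List.drop_zero]
      rw [max_comm (0 : Int) e.2.2, pv_foldl_max_shift, max_comm]
    | succ k =>
      rw [sufArr_cons]
      simp only [List.getD_cons_succ, List.drop_succ_cons]
      exact ih k (by simp at hk; omega)

-- ===== VERDICT (by name: the statement is the Claim_ definition above) =====
theorem maxTwo_spec : Claim_equal_maxTwo := by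
  unfold Claim_equal_maxTwo Spec_maxTwo
  intro events _
  unfold maxTwo maxTwo_alt
  dsimp only
  set es := pvSortEv events with hes
  have hp : es.Pairwise (fun a b : Int × Int × Int => a.1 ≤ b.1) := by
    have h := PySem.List.sorted_pairwise events (fun e => toLex (e.1, toLex (e.2.1, e.2.2)))
    refine h.imp ?_
    intro a b hab
    rcases Prod.Lex.le_iff.mp hab with h' | h'
    · exact le_of_lt h'
    · exact le_of_eq h'.1
  rw [PySem.List.foldl_pyRange_zero_pyGetD' es (0, 0, 0)
    (fun ans ev => max ans
      ((PySem.List.slice es (some (binaryLoop es ev.2.1 (es.length + 1) 0 ((es.length : Int) - 1) + 1)) none).foldl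
        (fun h t => max h t.2.2) 0 + ev.2.2)) 0]
  apply PySem.List.foldl_congr_mem
  intro ans ev _
  have hcle : pvCnt es ev.2.1 ≤ es.length := List.countP_le_length
  have hbin : binaryLoop es ev.2.1 (es.length + 1) 0 ((es.length : Int) - 1) = (pvCnt es ev.2.1 : Int) - 1 := by
    apply binaryLoop_eq es ev.2.1 hp (es.length + 1) 0 ((es.length : Int) - 1) (by omega) (by omega)
      (by omega) (by omega)
    · intro j hj hjl; omega
    · intro j hj hjg; omega
  have hbis : bisLoop es ev.2.1 (es.length + 1) 0 (es.length : Int) = (pvCnt es ev.2.1 : Int) := by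
    apply bisLoop_eq es ev.2.1 hp (es.length + 1) 0 (es.length : Int) (by omega) (by omega)
      (by omega) (by omega)
    · intro j hj hjl; omega
    · intro j hj hjg; omega
  rw [hbin, hbis]
  have h1 : (pvCnt es ev.2.1 : Int) - 1 + 1 = ((pvCnt es ev.2.1 : Nat) : Int) := by omega
  rw [h1, PySem.List.slice_from es (by omega), Int.toNat_natCast,
    PySem.List.pyGetD_natCast, sufArr_getD es (pvCnt es ev.2.1) hcle]
  set X := ((es.drop (pvCnt es ev.2.1)).foldl (fun h t => max h t.2.2) 0) with hX
  by_cases hgt : X + ev.2.2 > ans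
  · rw [if_pos hgt]; omega
  · rw [if_neg hgt]; omega
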